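-- pv_equiv track=rewrite | github.com/sagearbor/dcri-mcp-tools | tools/randomization_generator.py | _get_stratum_combinations
-- ===== SOURCE A (Python) =====
-- def _get_stratum_combinations(strata: dict) -> list:
--     """Get all combinations of strata."""
--     import itertools
--
--     keys = list(strata.keys())
--     values = list(strata.values())
--
--     combinations = []
--     for combo in itertools.product(*values):
--         stratum_dict = dict(zip(keys, combo))
--         combinations.append(stratum_dict)
--
--     return combinations
-- ===== SOURCE B (Python) =====
-- def _get_stratum_combinations(strata: dict) -> list:
--     """Get all combinations of strata (fold over keys instead of itertools.product)."""
--     result = [{}]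
--     for key, vals in strata.items():
--         result = [{**partial, key: val} for partial in result for val in vals]
--     return result
-- ===== Notes on version B (the rewrite author's own statement) =====
-- stated objective: simpler
-- what changed: Replaces itertools.product plus dict(zip(keys, combo)) reassembly with a single fold over the dict items that extends each partial dict by one key, keeping product's rightmost-fastest order.
import Mathlib
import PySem

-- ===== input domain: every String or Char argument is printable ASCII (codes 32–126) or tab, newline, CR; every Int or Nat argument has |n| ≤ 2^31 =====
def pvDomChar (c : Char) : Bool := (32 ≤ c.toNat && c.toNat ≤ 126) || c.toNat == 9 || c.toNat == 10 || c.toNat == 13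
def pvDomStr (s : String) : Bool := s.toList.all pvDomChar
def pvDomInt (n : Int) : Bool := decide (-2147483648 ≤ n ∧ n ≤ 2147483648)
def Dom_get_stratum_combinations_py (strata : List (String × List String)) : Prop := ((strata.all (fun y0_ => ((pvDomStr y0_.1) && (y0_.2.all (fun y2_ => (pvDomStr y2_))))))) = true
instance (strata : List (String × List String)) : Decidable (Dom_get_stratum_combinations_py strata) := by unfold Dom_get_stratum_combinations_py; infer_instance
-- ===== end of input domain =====

-- B replaces itertools.product + dict(zip(keys, combo)) by a single fold over the items that
-- extends each partial dict by one key (simpler decomposition, same cost, same order).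

-- ===== PORT A =====
-- itertools.product(*values): first list is the outermost loop, rightmost varies fastest.
def pyProduct : List (List String) → List (List String)
  | [] => [[]]
  | vs :: rest => vs.flatMap (fun v => (pyProduct rest).map (fun t => v :: t))

-- dict(zip(keys, combo)): under Pre_ (distinct keys, as in any Python dict) this dict's
-- items are exactly the zipped pair list, so the zip is the exact port of that dict.
def get_stratum_combinations_py (strata : List (String × List String)) : List (List (String × String)) :=
  let keys := strata.map Prod.fst
  let values := strata.map Prod.snd
  (pyProduct values).foldl (fun combinations combo => combinations ++ [keys.zip combo]) []

-- ===== PORT B =====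
-- {**partial, key: val}: under Pre_ key is fresh for every partial, so the merge appends
-- the pair at the end — exactly this list append.
def get_stratum_combinations_py_alt (strata : List (String × List String)) : List (List (String × String)) :=
  strata.foldl
    (fun result kv => result.flatMap (fun partial_ => kv.2.map (fun val => partial_ ++ [(kv.1, val)])))
    [[]]

-- ===== PRECONDITION & SPEC =====
-- The Python parameter is a dict, whose keys are necessarily distinct; Pre_ restricts the
-- association-list encoding to exactly the lists that represent a dict (it excludes no dict input).
def Pre_get_stratum_combinations_py (strata : List (String × List String)) : Prop :=
  (strata.map Prod.fst).Nodup
instance (strata : List (String × List String)) : Decidable (Pre_get_stratum_combinations_py strata) := by unfold Pre_get_stratum_combinations_py; infer_instance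

def pvWitness_get_stratum_combinations_py : (List (String × List String)) :=
  [("site", ["A", "B"]), ("age", ["young", "old"])]

def Spec_get_stratum_combinations_py (strata : List (String × List String)) (out : List (List (String × String))) : Prop := out = get_stratum_combinations_py_alt strata
instance (strata : List (String × List String)) (out : List (List (String × String))) : Decidable (Spec_get_stratum_combinations_py strata out) := by unfold Spec_get_stratum_combinations_py; infer_instance

-- ===== CLAIM (what is proved, stated in full; the proofs are below) =====
def Claim_equal_get_stratum_combinations_py : Prop := ∀ (strata : List (String × List String)), Dom_get_stratum_combinations_py strata → Pre_get_stratum_combinations_py strata → Spec_get_stratum_combinations_py strata (get_stratum_combinations_py strata)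

-- ===== LEMMAS AND PROOFS =====

-- B's fold step distributes over ++ of the accumulator.
theorem alt_foldl_append (rest : List (String × List String))
    (xs ys : List (List (String × String))) :
    rest.foldl (fun result kv => result.flatMap (fun p => kv.2.map (fun v => p ++ [(kv.1, v)]))) (xs ++ ys)
      = rest.foldl (fun result kv => result.flatMap (fun p => kv.2.map (fun v => p ++ [(kv.1, v)]))) xs
        ++ rest.foldl (fun result kv => result.flatMap (fun p => kv.2.map (fun v => p ++ [(kv.1, v)]))) ys := by
  induction rest generalizing xs ys with
  | nil => simp
  | cons kv rest ih =>
      simp only [List.foldl_cons, List.flatMap_append]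
      exact ih _ _

-- B's fold from any accumulator is the flatMap of the singleton folds.
theorem alt_foldl_flatMap (rest : List (String × List String))
    (qs : List (List (String × String))) :
    rest.foldl (fun result kv => result.flatMap (fun p => kv.2.map (fun v => p ++ [(kv.1, v)]))) qs
      = qs.flatMap (fun q =>
          rest.foldl (fun result kv => result.flatMap (fun p => kv.2.map (fun v => p ++ [(kv.1, v)]))) [q]) := by
  induction qs with
  | nil =>
      induction rest with
      | nil => simp
      | cons kv rest ih => simpa using ih
  | cons q qs ih =>
      have h := alt_foldl_append rest [q] qs
      simpa [ih] using h

-- Main invariant: A's zipped products with a fixed prefix equal B's fold from that prefix.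
theorem key_lemma (strata : List (String × List String)) (p : List (String × String)) :
    (pyProduct (strata.map Prod.snd)).map (fun combo => p ++ (strata.map Prod.fst).zip combo)
      = strata.foldl (fun result kv => result.flatMap (fun q => kv.2.map (fun v => q ++ [(kv.1, v)]))) [p] := by
  induction strata generalizing p with
  | nil => simp [pyProduct]
  | cons kv rest ih =>
      simp only [List.map_cons, pyProduct, List.map_flatMap, List.foldl_cons,
        List.flatMap_cons, List.flatMap_nil, List.append_nil]
      rw [alt_foldl_flatMap rest (kv.2.map _)]
      simp only [List.flatMap_map]
      refine List.flatMap_congr ?_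
      intro v _
      rw [← ih (p ++ [(kv.1, v)])]
      simp [List.map_map, Function.comp_def]

-- ===== VERDICT (by name: the statement is the Claim_ definition above) =====
theorem get_stratum_combinations_py_spec : Claim_equal_get_stratum_combinations_py := by
  intro strata _ _
  unfold Spec_get_stratum_combinations_py get_stratum_combinations_py get_stratum_combinations_py_alt
  rw [PySem.List.foldl_append_singleton_eq_map]
  simpa using key_lemma strata []
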